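-- pv_equiv track=rewrite | github.com/wl00037/Algorithm-notes | 打印正三角形（阿里大文娱一面）.py | GetRegularTriangle
-- ===== SOURCE A (Python) =====
-- def GetRegularTriangle(n):
--     #   先拿到1-n的数组，用列表推到式
--     AllNumberList = [i+1 for i in range(n)]
--     result = ""
--     start = 1
--     while start <= len(AllNumberList):      #   start从1开始逐层+1，只要start<AllNumberList中元素数量，就表示这行是可行的
--         current = AllNumberList[:start]
--         for j in current:
--             result = result + str(j) + " "
--         result += "\n"
--         AllNumberList = AllNumberList[start:]       #   拿到AllNumberList中的start个元素，并且删除前start个元素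
--         start += 1
--
--     if len(AllNumberList) > 0:      #   主要兼容如果最终AllNumberList还有剩余元素的情况
--         for j in AllNumberList:
--             result = result + str(j) + " "
--         result += "\n"
--
--     return result
-- ===== SOURCE B (Python) =====
-- def GetRegularTriangle(n):
--     # Counter-based: next number `num` and row size `row`; no list building or slicing.
--     rows = []
--     num = 1
--     row = 1
--     while num + row - 1 <= n:
--         rows.append("".join(str(k) + " " for k in range(num, num + row)) + "\n")
--         num += row
--         row += 1
--     if num <= n:
--         rows.append("".join(str(k) + " " for k in range(num, n + 1)) + "\n")
--     return "".join(rows)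
-- ===== Notes on version B (the rewrite author's own statement) =====
-- stated objective: faster
-- what changed: Replaced A's materialized 1..n list with destructive slicing and a quadratic growing-string accumulator by two integer counters (next number, row size) that emit each row as a join over range(), collecting rows in a list joined once at the end.
import Mathlib
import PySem

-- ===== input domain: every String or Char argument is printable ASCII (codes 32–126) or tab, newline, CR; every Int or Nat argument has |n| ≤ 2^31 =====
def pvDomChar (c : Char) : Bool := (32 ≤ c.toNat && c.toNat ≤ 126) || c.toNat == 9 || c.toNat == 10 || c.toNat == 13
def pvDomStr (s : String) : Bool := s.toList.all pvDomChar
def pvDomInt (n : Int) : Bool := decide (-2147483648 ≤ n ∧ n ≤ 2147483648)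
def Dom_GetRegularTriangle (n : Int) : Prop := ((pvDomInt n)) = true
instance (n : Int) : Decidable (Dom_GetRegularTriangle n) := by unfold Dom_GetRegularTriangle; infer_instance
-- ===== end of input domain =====

-- B replaces A's 1..n list with its destructive slicing by two integer counters (next number, row
-- size) and joins range-generated row strings (idiomatic decomposition; same output, no list kept).

-- ===== PORT A =====
-- inner 'for j in current: result = result + str(j) + " "' loop of A
def pvRowFold (cur : List Int) (result : String) : String :=
  cur.foldl (fun r j => r ++ PySem.Int.toStr j ++ " ") result

-- A's while loop; 'start' is always ≥ 1 (it begins at 1 and only grows), carried as hypothesis for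
-- termination; returns (result, remaining AllNumberList) at loop exit
def pvALoop (lst : List Int) (start : Nat) (hs : 1 ≤ start) (result : String) : String × List Int :=
  if h : start ≤ lst.length then
    pvALoop (PySem.List.slice lst (some (start : Int)) none) (start + 1) (by omega)
      (pvRowFold (PySem.List.slice lst none (some (start : Int))) result ++ "\n")
  else
    (result, lst)
termination_by lst.length
decreasing_by simp [PySem.List.slice_from_natCast]; omega

-- the trailing 'if len(AllNumberList) > 0' block of A
def pvAFinish (p : String × List Int) : String :=
  if 0 < p.2.length then pvRowFold p.2 p.1 ++ "\n" else p.1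

def GetRegularTriangle (n : Int) : String :=
  pvAFinish (pvALoop ((PySem.List.pyRange 0 n 1).map (fun i => i + 1)) 1 (by omega) "")

-- ===== PORT B =====
-- one row: '"".join(str(k) + " " for k in range(lo, hi)) + "\n"'
def pvRowStr (lo hi : Int) : String :=
  PySem.Str.join "" ((PySem.List.pyRange lo hi 1).map (fun k => PySem.Int.toStr k ++ " ")) ++ "\n"

-- B's while loop plus its trailing leftover-row 'if'; 'row' is always ≥ 1, carried for termination
def pvBLoop (n num row : Int) (hr : 1 ≤ row) : List String :=
  if num + row - 1 ≤ n then
    pvRowStr num (num + row) :: pvBLoop n (num + row) (row + 1) (by omega)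
  else if num ≤ n then [pvRowStr num (n + 1)] else []
termination_by (n + 1 - num).toNat
decreasing_by omega

def GetRegularTriangle_alt (n : Int) : String :=
  PySem.Str.join "" (pvBLoop n 1 1 (by omega))

-- ===== PRECONDITION & SPEC =====
def Spec_GetRegularTriangle (n : Int) (out : String) : Prop := out = GetRegularTriangle_alt n
instance (n : Int) (out : String) : Decidable (Spec_GetRegularTriangle n out) := by unfold Spec_GetRegularTriangle; infer_instance

-- ===== CLAIM (what is proved, stated in full; the proofs are below) =====
def Claim_equal_GetRegularTriangle : Prop := ∀ (n : Int), Dom_GetRegularTriangle n → Spec_GetRegularTriangle n (GetRegularTriangle n)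

-- ===== LEMMAS AND PROOFS =====

lemma pvIntercalate_nil_cons (a : List Char) (l : List (List Char)) :
    List.intercalate [] (a :: l) = a ++ List.intercalate [] l := by
  cases l <;> simp [List.intercalate, List.intersperse]

lemma pvJoin_cons (a : String) (l : List String) :
    PySem.Str.join "" (a :: l) = a ++ PySem.Str.join "" l := by
  apply String.toList_inj.mp
  simp [PySem.Str.join, PySem.Chars.join, pvIntercalate_nil_cons]

lemma pvJoin_nil : PySem.Str.join "" ([] : List String) = "" := by decide

lemma pvRowFold_eq (l : List Int) : ∀ res : String,
    pvRowFold l res = res ++ PySem.Str.join "" (l.map (fun k => PySem.Int.toStr k ++ " ")) := by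
  induction l with
  | nil => intro res; simp [pvRowFold, pvJoin_nil]
  | cons x t ih =>
      intro res
      show pvRowFold t (res ++ PySem.Int.toStr x ++ " ") = _
      rw [ih]
      simp only [List.map_cons]
      rw [pvJoin_cons]
      simp [String.append_assoc]

lemma pvTake_pyRange (m : Int) (s L : Nat) (h : s ≤ L) :
    (PySem.List.pyRange m (m + (L : Int)) 1).take s = PySem.List.pyRange m (m + (s : Int)) 1 := by
  rw [PySem.List.pyRange_one_append m (m + (s : Int)) (m + (L : Int)) (by omega) (by omega)]
  rw [List.take_append_of_le_length (by simp [PySem.List.length_pyRange_one])]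
  rw [List.take_of_length_le (by simp [PySem.List.length_pyRange_one])]

lemma pvDrop_pyRange (m : Int) (s L : Nat) (h : s ≤ L) :
    (PySem.List.pyRange m (m + (L : Int)) 1).drop s = PySem.List.pyRange (m + (s : Int)) (m + (L : Int)) 1 := by
  rw [PySem.List.pyRange_one_append m (m + (s : Int)) (m + (L : Int)) (by omega) (by omega)]
  rw [List.drop_append_of_le_length (by simp [PySem.List.length_pyRange_one])]
  rw [List.drop_of_length_le (by simp [PySem.List.length_pyRange_one])]
  simp

lemma pvMain : ∀ (L : Nat) (m : Int) (s : Nat) (hs : 1 ≤ s) (res : String),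
    pvAFinish (pvALoop (PySem.List.pyRange m (m + (L : Int)) 1) s hs res)
      = res ++ PySem.Str.join "" (pvBLoop (m + (L : Int) - 1) m (s : Int) (by exact_mod_cast hs)) := by
  intro L
  induction L using Nat.strong_induction_on with
  | _ L IH =>
    intro m s hs res
    have hlen : (PySem.List.pyRange m (m + (L : Int)) 1).length = L := by
      simp [PySem.List.length_pyRange_one]
    by_cases h : s ≤ L
    · rw [pvALoop, dif_pos (by omega : s ≤ (PySem.List.pyRange m (m + (L : Int)) 1).length)]
      rw [PySem.List.slice_to_natCast, PySem.List.slice_from_natCast]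
      rw [pvTake_pyRange m s L h, pvDrop_pyRange m s L h]
      rw [show m + (L : Int) = (m + (s : Int)) + ((L - s : Nat) : Int) from by omega]
      rw [IH (L - s) (by omega)]
      conv_rhs => rw [pvBLoop]
      rw [if_pos (by omega : m + (s : Int) - 1 ≤ m + (s : Int) + ((L - s : Nat) : Int) - 1)]
      rw [pvJoin_cons, pvRowFold_eq]
      push_cast
      simp [pvRowStr, String.append_assoc]
    · rw [pvALoop, dif_neg (by omega : ¬ s ≤ (PySem.List.pyRange m (m + (L : Int)) 1).length)]
      by_cases hL : 0 < L
      · rw [pvBLoop, if_neg (by omega : ¬ m + (s : Int) - 1 ≤ m + (L : Int) - 1),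
            if_pos (by omega : m ≤ m + (L : Int) - 1)]
        rw [show m + (L : Int) - 1 + 1 = m + (L : Int) from by omega]
        rw [pvJoin_cons, pvJoin_nil]
        simp only [pvAFinish]
        rw [if_pos (show 0 < (PySem.List.pyRange m (m + (L : Int)) 1).length by rw [hlen]; omega)]
        rw [pvRowFold_eq]
        simp [pvRowStr, String.append_assoc]
      · have hL0 : L = 0 := by omega
        subst hL0
        rw [pvBLoop, if_neg (by omega : ¬ m + (s : Int) - 1 ≤ m + ((0:Nat) : Int) - 1),
            if_neg (by omega : ¬ m ≤ m + ((0:Nat) : Int) - 1)]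
        simp [pvAFinish, pvJoin_nil]

-- ===== VERDICT (by name: the statement is the Claim_ definition above) =====
theorem GetRegularTriangle_spec : Claim_equal_GetRegularTriangle := by
  intro n _
  show GetRegularTriangle n = GetRegularTriangle_alt n
  unfold GetRegularTriangle GetRegularTriangle_alt
  have hlist : (PySem.List.pyRange 0 n 1).map (fun i => i + 1)
      = PySem.List.pyRange 1 (1 + ((n.toNat : Nat) : Int)) 1 := by
    rw [PySem.List.pyRange_one, PySem.List.pyRange_one]
    rw [show ((1 + ((n.toNat : Nat) : Int)) - 1).toNat = n.toNat from by omega]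
    rw [show (n - 0).toNat = n.toNat from by omega]
    rw [List.map_map]
    exact List.map_congr_left (fun k _ => by simp; ring)
  rw [hlist, pvMain n.toNat 1 1 (by omega) ""]
  by_cases hn : 0 ≤ n
  · rw [show (1 + ((n.toNat : Nat) : Int) - 1) = n from by omega]
    simp
  · rw [show (1 + ((n.toNat : Nat) : Int) - 1) = 0 from by omega]
    rw [pvBLoop, if_neg (by omega), if_neg (by omega)]
    rw [pvBLoop, if_neg (by omega), if_neg (by omega)]
    simp [pvJoin_nil]
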